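-- pv_equiv track=rewrite | github.com/oryet/WinSerialTool | Protocol/dl645.py | FieldParsing645_I
-- ===== SOURCE A (Python) =====
-- def FieldParsing645_I(data):
--     if len(data) != 6:
--         return 'Cannot Parse The data: ' + data
--     TempStrValue = ''
--     strValue = ''
--     TempStrValue = Reversal(data)
--     for i in range(0,len(TempStrValue),1):
--         if i == 3:
--             strValue = strValue + '.'
--         strValue = strValue + TempStrValue[i]
--     return strValue
--
-- def Reversal(data):
--     TempStrValue = ''
--     for i in range(len(data) - 1, -1, -2):
--         TempStrValue += data[i - 1]
--         TempStrValue += data[i]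
--     return TempStrValue
-- ===== SOURCE B (Python) =====
-- def FieldParsing645_I(data):
--     if len(data) != 6:
--         return 'Cannot Parse The data: ' + data
--     return data[4] + data[5] + data[2] + '.' + data[3] + data[0] + data[1]
-- ===== Notes on version B (the rewrite author's own statement) =====
-- stated objective: simpler
-- what changed: Replaced the pairwise-reversal helper loop plus the dot-insertion loop with a single closed-form fixed permutation of the six characters.
import Mathlib
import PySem

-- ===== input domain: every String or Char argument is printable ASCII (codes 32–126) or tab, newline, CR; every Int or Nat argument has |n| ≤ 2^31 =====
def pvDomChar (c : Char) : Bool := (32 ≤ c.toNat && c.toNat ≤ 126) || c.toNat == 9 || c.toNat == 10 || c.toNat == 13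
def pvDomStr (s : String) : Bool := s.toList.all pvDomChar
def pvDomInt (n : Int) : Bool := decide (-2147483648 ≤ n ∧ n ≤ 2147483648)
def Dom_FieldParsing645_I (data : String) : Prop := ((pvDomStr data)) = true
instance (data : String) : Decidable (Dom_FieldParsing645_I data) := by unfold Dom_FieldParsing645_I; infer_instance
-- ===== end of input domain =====

-- B replaces A's reversal loop and dot-insertion loop with one closed-form permutation of the six characters (objective: simpler).

-- ===== PORT A =====
-- port of helper Reversal: range(len(data)-1, -1, -2), appending data[i-1] and data[i]
-- (pyGet? is none only on an out-of-range index, which Python would raise on; inside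
-- FieldParsing645_I the loop only runs with len = 6 so every index is in range and
-- Option.elim adds nothing — exact)
def Reversal645 (l : List Char) : List Char :=
  (PySem.List.pyRange (PySem.Chars.len l - 1) (-1) (-2)).foldl
    (fun acc i =>
      acc ++ ((PySem.List.pyGet? l (i - 1)).elim [] (fun c => [c]))
          ++ ((PySem.List.pyGet? l i).elim [] (fun c => [c]))) []

def FieldParsing645_I (data : String) : String :=
  let l := data.toList
  if PySem.Chars.len l ≠ 6 then String.ofList ("Cannot Parse The data: ".toList ++ l)
  else
    let t := Reversal645 l
    String.ofList ((PySem.List.pyRange 0 (PySem.Chars.len t) 1).foldl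
      (fun acc i =>
        (if i == 3 then acc ++ ['.'] else acc)
          ++ ((PySem.List.pyGet? t i).elim [] (fun c => [c]))) [])

-- ===== PORT B =====
def FieldParsing645_I_alt (data : String) : String :=
  let l := data.toList
  if PySem.Chars.len l ≠ 6 then String.ofList ("Cannot Parse The data: ".toList ++ l)
  else
    let g := fun (i : Int) => (PySem.List.pyGet? l i).elim [] (fun c => [c])
    String.ofList (g 4 ++ g 5 ++ g 2 ++ ['.'] ++ g 3 ++ g 0 ++ g 1)

-- ===== PRECONDITION & SPEC =====
def Spec_FieldParsing645_I (data : String) (out : String) : Prop := out = FieldParsing645_I_alt data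
instance (data : String) (out : String) : Decidable (Spec_FieldParsing645_I data out) := by unfold Spec_FieldParsing645_I; infer_instance

-- ===== CLAIM (what is proved, stated in full; the proofs are below) =====
def Claim_equal_FieldParsing645_I : Prop := ∀ (data : String), Dom_FieldParsing645_I data → Spec_FieldParsing645_I data (FieldParsing645_I data)

-- ===== LEMMAS AND PROOFS =====

theorem Reversal645_six (a b c d e f : Char) :
    Reversal645 [a, b, c, d, e, f] = [e, f, c, d, a, b] := by
  have hr : PySem.List.pyRange 5 (-1) (-2) = [5, 3, 1] := by decide
  simp [Reversal645, PySem.Chars.len, hr, PySem.List.pyGet?, PySem.List.pyIdx?]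

theorem FieldParsing645_eq (data : String) :
    FieldParsing645_I data = FieldParsing645_I_alt data := by
  unfold FieldParsing645_I FieldParsing645_I_alt
  by_cases h : PySem.Chars.len data.toList ≠ 6
  · rw [if_pos h, if_pos h]
  · rw [not_ne_iff] at h
    have hlen : data.toList.length = 6 := by
      have := h; simp [PySem.Chars.len_eq] at this; exact_mod_cast this
    obtain ⟨a, b, c, d, e, f, hl⟩ :
        ∃ a b c d e f, data.toList = [a, b, c, d, e, f] := by
      match hm : data.toList, hlen with
      | [a, b, c, d, e, f], _ => exact ⟨a, b, c, d, e, f, rfl⟩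
    have hr : PySem.List.pyRange 0 6 1 = [0, 1, 2, 3, 4, 5] := by decide
    simp only [hl, Reversal645_six]
    simp [PySem.Chars.len, hr, PySem.List.pyGet?, PySem.List.pyIdx?]

-- ===== VERDICT (by name: the statement is the Claim_ definition above) =====
theorem FieldParsing645_I_spec : Claim_equal_FieldParsing645_I := by
  intro data _
  unfold Spec_FieldParsing645_I
  exact FieldParsing645_eq data
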